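-- pv_equiv track=rewrite | github.com/DidierStevens/DidierStevensSuite | oledump.py | ExtraInfoHISTOGRAM
-- ===== SOURCE A (Python) =====
-- def CIC(expression):
--     if callable(expression):
--         return expression()
--     else:
--         return expression
--
-- def IFF(expression, valueTrue, valueFalse):
--     if expression:
--         return CIC(valueTrue)
--     else:
--         return CIC(valueFalse)
--
-- def P23Ord(value):
--     if type(value) == int:
--         return value
--     else:
--         return ord(value)
--
-- def ExtraInfoHISTOGRAM(data):
--     dPrevalence = {iter: 0 for iter in range(0x100)}
--     for char in data:
--         dPrevalence[P23Ord(char)] += 1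
--     result = []
--     count = 0
--     minimum = None
--     maximum = None
--     for iter in range(0x100):
--         if dPrevalence[iter] > 0:
--             result.append('0x%02x:%d' % (iter, dPrevalence[iter]))
--             count += 1
--             if minimum == None:
--                 minimum = iter
--             else:
--                 minimum = min(minimum, iter)
--             if maximum == None:
--                 maximum = iter
--             else:
--                 maximum = max(maximum, iter)
--     result.insert(0, '%d' % count)
--     result.insert(1, IFF(minimum == None, '', '0x%02x' % minimum))
--     result.insert(2, IFF(maximum == None, '', '0x%02x' % maximum))
--     return ','.join(result)
-- ===== SOURCE B (Python) =====
-- def P23Ord(value):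
--     if type(value) == int:
--         return value
--     else:
--         return ord(value)
--
-- def ExtraInfoHISTOGRAM(data):
--     codes = [P23Ord(c) for c in data]
--     keys = sorted(set(codes))
--     parts = ['%d' % len(keys),
--              '0x%02x' % keys[0] if keys else '',
--              '0x%02x' % keys[-1] if keys else '']
--     parts.extend('0x%02x:%d' % (k, codes.count(k)) for k in keys)
--     return ','.join(parts)
-- ===== Notes on version B (the rewrite author's own statement) =====
-- stated objective: simpler
-- what changed: Instead of a 256-entry prevalence dict and a second range(256) scan with running None-guarded min/max accumulators, B sorts the set of byte codes actually present and reads count, min and max directly off that sorted key list (len, first, last), formatting each entry with list.count.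
-- crash fix: On empty data A raises TypeError because '0x%02x' % None is evaluated eagerly inside the IFF call even though minimum/maximum are None; B returns the natural empty histogram '0,,'. — e.g. on ExtraInfoHISTOGRAM(""): A raises TypeError, B returns "0,,"
import Mathlib
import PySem

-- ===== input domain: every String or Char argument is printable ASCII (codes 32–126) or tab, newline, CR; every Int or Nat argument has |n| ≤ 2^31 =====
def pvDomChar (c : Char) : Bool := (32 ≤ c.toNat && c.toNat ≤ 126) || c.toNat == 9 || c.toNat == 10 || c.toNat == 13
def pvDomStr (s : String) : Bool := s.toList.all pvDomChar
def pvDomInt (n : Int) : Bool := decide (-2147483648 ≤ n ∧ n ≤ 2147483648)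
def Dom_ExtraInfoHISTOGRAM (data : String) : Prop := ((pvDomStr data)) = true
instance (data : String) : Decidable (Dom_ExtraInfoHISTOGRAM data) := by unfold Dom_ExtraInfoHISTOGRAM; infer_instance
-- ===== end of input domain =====

-- B replaces A's 256-slot prevalence dict + second range(256) scan with running None-guarded
-- min/max by sorting the set of byte codes present and reading count/min/max off that sorted
-- list (len/first/last); objective: simpler.

-- '%02x' with the '0x' prefix, exact for 0 ≤ k < 256 (the only values both Pythons format:
-- dict keys / byte codes below 0x100).
def pyHexDigit (n : Nat) : Char := if n < 10 then Char.ofNat (48 + n) else Char.ofNat (87 + n)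
def pyHex02 (k : Int) : String := "0x" ++ String.ofList [pyHexDigit (k.toNat / 16), pyHexDigit (k.toNat % 16)]

-- ===== PORT A =====
def ExtraInfoHISTOGRAM (data : String) : String :=
  -- dPrevalence = {iter: 0 for iter in range(0x100)}
  let d0 : PySem.Dict Int Int := (PySem.List.pyRange 0 256 1).foldl (fun d i => d.insert i 0) PySem.Dict.empty
  -- for char in data: dPrevalence[P23Ord(char)] += 1   (key always present, so d[k] = d.get(k,0)+1 is exact)
  let d1 := data.toList.foldl (fun d c => d.insert ((c.toNat : Int)) (d.getD (c.toNat : Int) 0 + 1)) d0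
  -- second loop: result list, count, minimum, maximum
  let st := (PySem.List.pyRange 0 256 1).foldl
    (fun (st : List String × Int × Option Int × Option Int) i =>
      match st with
      | (result, count, minimum, maximum) =>
        if d1.getD i 0 > 0 then
          (result ++ [pyHex02 i ++ ":" ++ PySem.Int.toStr (d1.getD i 0)],
           count + 1,
           (match minimum with | none => some i | some m => some (min m i)),
           (match maximum with | none => some i | some m => some (max m i)))
        else (result, count, minimum, maximum))
    ([], 0, none, none)
  let result := PySem.List.insert st.1 0 (PySem.Int.toStr st.2.1)
  let result := PySem.List.insert result 1 (match st.2.2.1 with | none => "" | some m => pyHex02 m)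
  let result := PySem.List.insert result 2 (match st.2.2.2 with | none => "" | some m => pyHex02 m)
  PySem.Str.join "," result

-- ===== PORT B =====
def ExtraInfoHISTOGRAM_alt (data : String) : String :=
  let codes := data.toList.map (fun c => (c.toNat : Int))
  let keys := PySem.List.sorted (PySem.Set.ofList codes) (fun x => x) false
  let parts := [PySem.Int.toStr (keys.length : Int),
                (match keys.head? with | none => "" | some k => pyHex02 k),
                (match keys.getLast? with | none => "" | some k => pyHex02 k)]
  let parts := parts ++ keys.map (fun k => pyHex02 k ++ ":" ++ PySem.Int.toStr (codes.count k))
  PySem.Str.join "," parts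

-- ===== PRECONDITION & SPEC =====
-- Pre_ excludes only the empty string: there A raises TypeError ('0x%02x' % None is evaluated
-- eagerly as an argument to IFF even though minimum is None).
def Pre_ExtraInfoHISTOGRAM (data : String) : Prop := data ≠ ""
instance (data : String) : Decidable (Pre_ExtraInfoHISTOGRAM data) := by unfold Pre_ExtraInfoHISTOGRAM; infer_instance
def pvWitness_ExtraInfoHISTOGRAM : String := "a"

-- On empty data A raises TypeError ('0x%02x' % None evaluated eagerly inside the IFF call);
-- B returns the natural empty histogram "0,,".
def Raises_ExtraInfoHISTOGRAM (data : String) : Prop := data = ""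
instance (data : String) : Decidable (Raises_ExtraInfoHISTOGRAM data) := by unfold Raises_ExtraInfoHISTOGRAM; infer_instance
def pvRaiseWitness_ExtraInfoHISTOGRAM : String := ""
def pvRaiseWitnessOut_ExtraInfoHISTOGRAM : String := "0,,"

def Spec_ExtraInfoHISTOGRAM (data : String) (out : String) : Prop := out = ExtraInfoHISTOGRAM_alt data
instance (data : String) (out : String) : Decidable (Spec_ExtraInfoHISTOGRAM data out) := by unfold Spec_ExtraInfoHISTOGRAM; infer_instance

-- ===== CLAIM (what is proved, stated in full; the proofs are below) =====
def Claim_equal_ExtraInfoHISTOGRAM : Prop := ∀ (data : String), Dom_ExtraInfoHISTOGRAM data → Pre_ExtraInfoHISTOGRAM data → Spec_ExtraInfoHISTOGRAM data (ExtraInfoHISTOGRAM data)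
def Claim_raises_ExtraInfoHISTOGRAM : Prop := (∀ (data : String), Dom_ExtraInfoHISTOGRAM data → Raises_ExtraInfoHISTOGRAM data → ¬ Pre_ExtraInfoHISTOGRAM data) ∧ (Dom_ExtraInfoHISTOGRAM (pvRaiseWitness_ExtraInfoHISTOGRAM) ∧ Raises_ExtraInfoHISTOGRAM (pvRaiseWitness_ExtraInfoHISTOGRAM) ∧ ExtraInfoHISTOGRAM_alt (pvRaiseWitness_ExtraInfoHISTOGRAM) = pvRaiseWitnessOut_ExtraInfoHISTOGRAM)

-- ===== LEMMAS AND PROOFS =====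

lemma pv_insert_zero {α : Type} (xs : List α) (v : α) : PySem.List.insert xs 0 v = v :: xs := by
  simp [PySem.List.insert, PySem.List.sliceIndices]

lemma pv_insert_one {α : Type} (x : α) (xs : List α) (v : α) :
    PySem.List.insert (x :: xs) 1 v = x :: v :: xs := by
  simp [PySem.List.insert, PySem.List.sliceIndices]

lemma pv_insert_two {α : Type} (x y : α) (xs : List α) (v : α) :
    PySem.List.insert (x :: y :: xs) 2 v = x :: y :: v :: xs := by
  have h2 : (min 2 ((xs.length : Int) + 1 + 1)).toNat = 2 := by omega
  simp [PySem.List.insert, PySem.List.sliceIndices, h2]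

-- the option-valued running min/max accumulators of A's second loop
def omin (o : Option Int) (k : Int) : Option Int := match o with | none => some k | some m => some (min m k)
def omax (o : Option Int) (k : Int) : Option Int := match o with | none => some k | some m => some (max m k)

lemma getD_init_zero (l : List Int) (d : PySem.Dict Int Int) (h : ∀ k, d.getD k 0 = 0) :
    ∀ k, (l.foldl (fun d i => d.insert i (0:Int)) d).getD k 0 = 0 := by
  intro k
  induction l generalizing d with
  | nil => exact h k
  | cons i t ih =>
      simp only [List.foldl_cons]
      exact ih _ (fun k' => by rw [PySem.Dict.getD_insert]; split <;> simp [h k'])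

lemma dict_count (data : String) :
    ∀ k, ((data.toList.foldl (fun d c => d.insert ((c.toNat : Int)) (d.getD (c.toNat : Int) 0 + 1))
        ((PySem.List.pyRange 0 256 1).foldl (fun d i => d.insert i 0) PySem.Dict.empty))).getD k 0
      = ((data.toList.map (fun c => (c.toNat : Int))).count k : Int) := by
  intro k
  rw [← List.foldl_map (f := fun c : Char => (c.toNat : Int))
      (g := fun (d : PySem.Dict Int Int) (x : Int) => d.insert x (d.getD x 0 + 1))]
  rw [PySem.Dict.getD_foldl_insert_add_one]
  rw [getD_init_zero _ _ (fun k' => by simp [PySem.Dict.getD_empty]) k]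
  omega

-- A's second loop, characterised over an arbitrary count function g
lemma loopA (g : Int → Int) (ks : List Int) (acc : List String) (c : Int) (mn mx : Option Int) :
    ks.foldl
      (fun (st : List String × Int × Option Int × Option Int) i =>
        match st with
        | (result, count, minimum, maximum) =>
          if g i > 0 then
            (result ++ [pyHex02 i ++ ":" ++ PySem.Int.toStr (g i)],
             count + 1,
             (match minimum with | none => some i | some m => some (min m i)),
             (match maximum with | none => some i | some m => some (max m i)))
          else (result, count, minimum, maximum))
      (acc, c, mn, mx)
    = ((acc ++ (ks.filter (fun k => decide (g k > 0))).map (fun k => pyHex02 k ++ ":" ++ PySem.Int.toStr (g k)),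
        c + ((ks.filter (fun k => decide (g k > 0))).length : Int),
        (ks.filter (fun k => decide (g k > 0))).foldl omin mn,
        (ks.filter (fun k => decide (g k > 0))).foldl omax mx)) := by
  induction ks generalizing acc c mn mx with
  | nil => simp
  | cons k t ih =>
      by_cases hg : g k > 0
      · simp only [List.foldl_cons, List.filter_cons, hg, decide_true, if_true]
        rw [ih]
        simp only [List.map_cons, List.length_cons, omin, omax]
        refine congrArg₂ _ ?_ (congrArg₂ _ ?_ rfl)
        · simp
        · push_cast; ring
      · simp only [List.foldl_cons, List.filter_cons, hg, decide_false, if_false]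
        rw [ih]
        simp

lemma foldl_omin_some (t : List Int) (m : Int) : t.foldl omin (some m) = some (t.foldl min m) := by
  induction t generalizing m with
  | nil => rfl
  | cons x t ih => simp [omin, ih]

lemma foldl_min_self (t : List Int) (m : Int) (h : ∀ x ∈ t, m ≤ x) : t.foldl min m = m := by
  induction t generalizing m with
  | nil => rfl
  | cons x t ih =>
      simp only [List.foldl_cons]
      rw [min_eq_left (h x (by simp))]
      exact ih m (fun y hy => h y (by simp [hy]))

lemma foldl_omin_head (fs : List Int) (h : fs.Pairwise (· < ·)) : fs.foldl omin none = fs.head? := by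
  cases fs with
  | nil => rfl
  | cons m t =>
      simp only [List.foldl_cons, omin, List.head?_cons]
      rw [foldl_omin_some, foldl_min_self]
      exact fun x hx => le_of_lt ((List.pairwise_cons.mp h).1 x hx)

lemma foldl_omax_some (t : List Int) (m : Int) : t.foldl omax (some m) = some (t.foldl max m) := by
  induction t generalizing m with
  | nil => rfl
  | cons x t ih => simp [omax, ih]

lemma foldl_max_last (t : List Int) (m : Int) (h : (m :: t).Pairwise (· < ·)) :
    some (t.foldl max m) = (m :: t).getLast? := by
  induction t generalizing m with
  | nil => rfl
  | cons x t ih =>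
      simp only [List.foldl_cons]
      rw [max_eq_right (le_of_lt ((List.pairwise_cons.mp h).1 x (by simp)))]
      rw [ih x (List.pairwise_cons.mp h).2, List.getLast?_cons_cons]

lemma foldl_omax_last (fs : List Int) (h : fs.Pairwise (· < ·)) : fs.foldl omax none = fs.getLast? := by
  cases fs with
  | nil => rfl
  | cons m t =>
      simp only [List.foldl_cons, omax]
      rw [foldl_omax_some, ← foldl_max_last t m h]

-- the ascending present-byte list of A equals B's sorted key list
lemma keys_eq (codes : List Int) (hb : ∀ k ∈ codes, k < 256) (hnn : ∀ k ∈ codes, 0 ≤ k) :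
    PySem.List.sorted (PySem.Set.ofList codes) (fun x => x) false
      = (PySem.List.pyRange 0 256 1).filter (fun k => decide ((codes.count k : Int) > 0)) := by
  have hmem : ∀ x : Int, x ∈ (PySem.List.pyRange 0 256 1).filter (fun k => decide ((codes.count k : Int) > 0)) ↔ x ∈ PySem.Set.ofList codes := by
    intro x
    simp only [List.mem_filter, PySem.List.mem_pyRange_one, PySem.Set.mem_ofList,
      decide_eq_true_eq]
    constructor
    · rintro ⟨-, h⟩
      have : 0 < codes.count x := by exact_mod_cast h
      exact List.count_pos_iff.mp this
    · intro hx
      refine ⟨⟨hnn x hx, hb x hx⟩, ?_⟩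
      have : 0 < codes.count x := List.count_pos_iff.mpr hx
      exact_mod_cast this
  have hpw : ((PySem.List.pyRange 0 256 1).filter (fun k => decide ((codes.count k : Int) > 0))).Pairwise (· < ·) :=
    (PySem.List.pairwise_lt_pyRange_one 0 256).filter _
  have hnd : ((PySem.List.pyRange 0 256 1).filter (fun k => decide ((codes.count k : Int) > 0))).Nodup :=
    hpw.imp (fun h => ne_of_lt h)
  have hperm : ((PySem.List.pyRange 0 256 1).filter (fun k => decide ((codes.count k : Int) > 0))).Perm (PySem.Set.ofList codes) :=
    (List.perm_ext_iff_of_nodup hnd (PySem.Set.nodup_ofList codes)).mpr hmem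
  exact PySem.List.sorted_eq_of_perm_of_pairwise_lt _ _ _ hperm hpw

-- ===== VERDICT (by name: the statement is the Claim_ definition above) =====
theorem ExtraInfoHISTOGRAM_spec : Claim_equal_ExtraInfoHISTOGRAM := by
  intro data hdom hpre
  unfold Spec_ExtraInfoHISTOGRAM ExtraInfoHISTOGRAM ExtraInfoHISTOGRAM_alt
  have hb : ∀ k ∈ data.toList.map (fun c => (c.toNat : Int)), k < 256 := by
    intro k hk
    obtain ⟨c, hc, rfl⟩ := List.mem_map.mp hk
    have := List.all_eq_true.mp hdom c hc
    simp only [pvDomChar, Bool.or_eq_true, Bool.and_eq_true, decide_eq_true_eq, beq_iff_eq] at this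
    omega
  have hnn : ∀ k ∈ data.toList.map (fun c => (c.toNat : Int)), 0 ≤ k := by
    intro k hk
    obtain ⟨c, hc, rfl⟩ := List.mem_map.mp hk
    positivity
  simp only [dict_count data]
  rw [loopA (fun i => ((data.toList.map (fun c => (c.toNat : Int))).count i : Int))]
  rw [keys_eq _ hb hnn]
  set fs := (PySem.List.pyRange 0 256 1).filter
      (fun k => decide (((data.toList.map (fun c => (c.toNat : Int))).count k : Int) > 0)) with hfs
  have hpw : fs.Pairwise (· < ·) := (PySem.List.pairwise_lt_pyRange_one 0 256).filter _
  rw [foldl_omin_head fs hpw, foldl_omax_last fs hpw]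
  rw [pv_insert_zero, pv_insert_one, pv_insert_two]
  simp

@[simp] theorem ExtraInfoHISTOGRAM_raises : Claim_raises_ExtraInfoHISTOGRAM := by
  unfold Claim_raises_ExtraInfoHISTOGRAM
  exact ⟨fun data _ h => by simpa [Pre_ExtraInfoHISTOGRAM] using h, by decide⟩
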